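-- pv_equiv track=rewrite | github.com/shhyunn/programmars | 159993.py | solution
-- ===== SOURCE A (Python) =====
-- def solution(maps):
--     row,col = len(maps),len(maps[0])
--     visited = [[[0 for _ in range(2)] for _ in range(col)] for _ in range(row)]
--
--     queue = []
--     y = [-1,1,0,0]
--     x = [0,0,-1,1]
--     end_y,end_x = -1,-1
--     for i in range(row):
--         for j in range(col):
--             if maps[i][j] == "S":
--                 queue.append((i,j,0,0))
--                 visited[i][j][0] = 1
--             if maps[i][j] == "E":
--                 end_y,end_x = i,j
--
--     while queue:
--         j,i,k,l = queue.pop(0)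
--         if j == end_y and i == end_x and l == 1:
--             return k
--
--         for n in range(4): #반복문 자체에서 l이 초기화가 안됨
--             cx = i + x[n]
--             cy = j + y[n]
--
--             if not(0 <= cy < row and 0 <= cx < col and maps[cy][cx] != "X"):
--                 continue
--
--             if maps[cy][cx] == "L": #레버일 경우
--                 if not visited[cy][cx][1]:#레버일 때의 그곳을 방문하지 않았을 경우
--                     visited[cy][cx][1] = 1 #방문으로 설정
--                     queue.append((cy,cx,k+1,1))
--             else:
--                 if not visited[cy][cx][l]: #레버가 아닐 경우
--                     visited[cy][cx][l] = 1
--                     queue.append((cy,cx,k+1,l))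
--     return -1
-- ===== SOURCE B (Python) =====
-- def solution(maps):
--     rows, cols = len(maps), len(maps[0])
--     dist = {}
--     exit_cell = None
--     for r in range(rows):
--         for c in range(cols):
--             if maps[r][c] == "S":
--                 dist[(r, c, 0)] = 0
--             if maps[r][c] == "E":
--                 exit_cell = (r, c)
--     if exit_cell is None:
--         return -1
--     for _ in range(2 * rows * cols):
--         new = dict(dist)
--         changed = False
--         for r in range(rows):
--             for c in range(cols):
--                 for b in (0, 1):
--                     d = dist.get((r, c, b))
--                     if d is None:
--                         continue
--                     for nr, nc in ((r - 1, c), (r + 1, c), (r, c - 1), (r, c + 1)):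
--                         if 0 <= nr < rows and 0 <= nc < cols and maps[nr][nc] != "X":
--                             t = (nr, nc, 1 if maps[nr][nc] == "L" else b)
--                             nd = new.get(t)
--                             if nd is None or d + 1 < nd:
--                                 new[t] = d + 1
--                                 changed = True
--         dist = new
--         if not changed:
--             break
--     d = dist.get((exit_cell[0], exit_cell[1], 1))
--     return -1 if d is None else d
-- ===== Notes on version B (the rewrite author's own statement) =====
-- stated objective: alternative
-- what changed: Replaces A's lever-state FIFO BFS (queue of (cell,bit,dist) entries with a 3D visited array) by Bellman-Ford-style rounds: a distance dictionary over (cell,bit) states is repeatedly relaxed along all out-edges until no entry changes (at most 2*rows*cols rounds), then the exit state is looked up; no queue, no visited array, no search order.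
import Mathlib
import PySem

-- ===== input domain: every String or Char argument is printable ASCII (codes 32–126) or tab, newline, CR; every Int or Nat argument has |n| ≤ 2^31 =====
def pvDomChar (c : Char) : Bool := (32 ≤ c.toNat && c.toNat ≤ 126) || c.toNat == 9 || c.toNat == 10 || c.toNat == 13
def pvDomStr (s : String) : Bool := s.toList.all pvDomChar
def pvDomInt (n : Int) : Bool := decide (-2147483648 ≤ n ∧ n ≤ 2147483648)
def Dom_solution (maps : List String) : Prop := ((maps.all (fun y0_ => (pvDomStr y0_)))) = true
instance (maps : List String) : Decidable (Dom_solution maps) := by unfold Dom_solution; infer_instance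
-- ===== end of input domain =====

-- B replaces A's lever-state FIFO BFS (queue + 3D visited array) by Bellman-Ford-style
-- relaxation: a distance dictionary over (cell, lever-bit) states is relaxed along all
-- out-edges round by round until no entry changes, then the exit state is looked up
-- (objective: alternative; same return value on every input A accepts).

-- shared helper: maps[y][x], total form (only evaluated in-bounds under Pre_)
def cellAt (maps : List String) (y x : Int) : Char :=
  ((PySem.List.pyGet? maps y).bind (fun s => PySem.Str.pyGet? s x)).getD ' '

-- ===== PORT A =====
def pvYs : List Int := [-1, 1, 0, 0]
def pvXs : List Int := [0, 0, -1, 1]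

-- visited, a 0/1 array in Python, is ported as the set of marked state triples (exact: the
-- array only ever records membership, entries in bounds under Pre_)
def stepA (maps : List String) (row col j i k l : Int)
    (st : List (Int × Int × Int × Int) × PySem.Set (Int × Int × Int)) (n : Int) :
    List (Int × Int × Int × Int) × PySem.Set (Int × Int × Int) :=
  let cy := j + PySem.List.pyGetD pvYs n 0
  let cx := i + PySem.List.pyGetD pvXs n 0
  if 0 ≤ cy ∧ cy < row ∧ 0 ≤ cx ∧ cx < col ∧ cellAt maps cy cx ≠ 'X' then
    if cellAt maps cy cx = 'L' then
      if PySem.Set.contains st.2 (cy, cx, 1) then st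
      else (st.1 ++ [(cy, cx, k + 1, 1)], PySem.Set.add st.2 (cy, cx, 1))
    else
      if PySem.Set.contains st.2 (cy, cx, l) then st
      else (st.1 ++ [(cy, cx, k + 1, l)], PySem.Set.add st.2 (cy, cx, l))
  else st

def cellStepA (maps : List String)
    (st : List (Int × Int × Int × Int) × PySem.Set (Int × Int × Int) × (Int × Int))
    (i j : Int) :
    List (Int × Int × Int × Int) × PySem.Set (Int × Int × Int) × (Int × Int) :=
  let st1 := if cellAt maps i j = 'S' then
      (st.1 ++ [(i, j, (0 : Int), (0 : Int))], PySem.Set.add st.2.1 (i, j, 0), st.2.2)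
    else st
  if cellAt maps i j = 'E' then (st1.1, st1.2.1, (i, j)) else st1

def scanA (maps : List String) (row col : Int) :
    List (Int × Int × Int × Int) × PySem.Set (Int × Int × Int) × (Int × Int) :=
  (PySem.List.pyRange 0 row 1).foldl
    (fun st i => (PySem.List.pyRange 0 col 1).foldl (fun st j => cellStepA maps st i j) st)
    ([], PySem.Set.empty, (-1, -1))

-- fuel is only a totality guard: one unit per pop; a run pops at most 2*row*col entries
def loopA (maps : List String) (row col ey ex : Int) :
    Nat → List (Int × Int × Int × Int) → PySem.Set (Int × Int × Int) → Int
  | 0, _, _ => -1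
  | _ + 1, [], _ => -1
  | f + 1, (j, i, k, l) :: rest, v =>
    if j = ey ∧ i = ex ∧ l = 1 then k
    else
      let st := (PySem.List.pyRange 0 4 1).foldl (stepA maps row col j i k l) (rest, v)
      loopA maps row col ey ex f st.1 st.2

def solution (maps : List String) : Int :=
  let row : Int := (maps.length : Int)
  let col : Int := ((maps.headD "").toList.length : Int)
  let sc := scanA maps row col
  loopA maps row col sc.2.2.1 sc.2.2.2 (2 * (row * col).toNat + 1) sc.1 sc.2.1

-- ===== PORT B =====
-- one relaxation of a single out-edge candidate: `if 0 <= nr < rows ... : t = ...; if nd is None or d+1 < nd: new[t] = d+1`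
def relaxStep (maps : List String) (rows cols d bbit : Int)
    (st : PySem.Dict (Int × Int × Int) Int × Bool) (p : Int × Int) :
    PySem.Dict (Int × Int × Int) Int × Bool :=
  if 0 ≤ p.1 ∧ p.1 < rows ∧ 0 ≤ p.2 ∧ p.2 < cols ∧ cellAt maps p.1 p.2 ≠ 'X' then
    let t : Int × Int × Int := (p.1, p.2, if cellAt maps p.1 p.2 = 'L' then 1 else bbit)
    match st.1.get? t with
    | none => (st.1.insert t (d + 1), true)
    | some nd => if d + 1 < nd then (st.1.insert t (d + 1), true) else st
  else st

-- `d = dist.get((r,c,b)); if d is None: continue; for nr, nc in (...)`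
def srcStep (maps : List String) (rows cols : Int) (dist : PySem.Dict (Int × Int × Int) Int)
    (st : PySem.Dict (Int × Int × Int) Int × Bool) (r c b : Int) :
    PySem.Dict (Int × Int × Int) Int × Bool :=
  match dist.get? (r, c, b) with
  | none => st
  | some d =>
    [(r - 1, c), (r + 1, c), (r, c - 1), (r, c + 1)].foldl (relaxStep maps rows cols d b) st

-- one round: `new = dict(dist); changed = False; for r ... for c ... for b in (0,1): ...`
def roundB (maps : List String) (rows cols : Int) (dist : PySem.Dict (Int × Int × Int) Int) :
    PySem.Dict (Int × Int × Int) Int × Bool :=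
  (PySem.List.pyRange 0 rows 1).foldl
    (fun st r => (PySem.List.pyRange 0 cols 1).foldl
      (fun st c => ([0, 1] : List Int).foldl (fun st b => srcStep maps rows cols dist st r c b) st)
      st)
    (dist, false)

-- `for _ in range(2*rows*cols): ... dist = new; if not changed: break`
def bellLoop (maps : List String) (rows cols : Int) :
    Nat → PySem.Dict (Int × Int × Int) Int → PySem.Dict (Int × Int × Int) Int
  | 0, dist => dist
  | k + 1, dist =>
    let st := roundB maps rows cols dist
    if st.2 then bellLoop maps rows cols k st.1 else st.1

def cellStepB (maps : List String)
    (st : PySem.Dict (Int × Int × Int) Int × Option (Int × Int)) (r c : Int) :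
    PySem.Dict (Int × Int × Int) Int × Option (Int × Int) :=
  let st1 := if cellAt maps r c = 'S' then (st.1.insert (r, c, 0) 0, st.2) else st
  if cellAt maps r c = 'E' then (st1.1, some (r, c)) else st1

def scanB (maps : List String) (rows cols : Int) :
    PySem.Dict (Int × Int × Int) Int × Option (Int × Int) :=
  (PySem.List.pyRange 0 rows 1).foldl
    (fun st r => (PySem.List.pyRange 0 cols 1).foldl (fun st c => cellStepB maps st r c) st)
    (PySem.Dict.empty, none)

def solution_alt (maps : List String) : Int :=
  let rows : Int := (maps.length : Int)
  let cols : Int := ((maps.headD "").toList.length : Int)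
  let sc := scanB maps rows cols
  match sc.2 with
  | none => -1
  | some e =>
    let final := bellLoop maps rows cols (2 * (rows * cols)).toNat sc.1
    match final.get? (e.1, e.2, 1) with
    | none => -1
    | some d => d

-- ===== PRECONDITION & SPEC =====
-- Pre_ excludes exactly the inputs where Python A raises IndexError: the empty grid
-- (len(maps[0])) and grids with a row shorter than row 0 (maps[i][j] out of range).
def Pre_solution (maps : List String) : Prop :=
  maps ≠ [] ∧ ∀ s ∈ maps, (maps.headD "").toList.length ≤ s.toList.length
instance (maps : List String) : Decidable (Pre_solution maps) := by
  unfold Pre_solution; infer_instance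

def pvWitness_solution : List String := ["SEL", "..X"]

def Spec_solution (maps : List String) (out : Int) : Prop := out = solution_alt maps
instance (maps : List String) (out : Int) : Decidable (Spec_solution maps out) := by
  unfold Spec_solution; infer_instance

-- ===== CLAIM (what is proved, stated in full; the proofs are below) =====
def Claim_equal_solution : Prop :=
  ∀ (maps : List String), Dom_solution maps → Pre_solution maps →
    Spec_solution maps (solution maps)

-- ===== LEMMAS AND PROOFS =====

-- ---------- proof-side helpers: the level-synchronised view of A's BFS ----------
def pvDirs : List (Int × Int) := [(-1, 0), (1, 0), (0, -1), (0, 1)]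

def stepB (maps : List String) (rows cols : Int) (s : Int × Int × Int)
    (st : List (Int × Int × Int) × PySem.Set (Int × Int × Int)) (dd : Int × Int) :
    List (Int × Int × Int) × PySem.Set (Int × Int × Int) :=
  let ny := s.1 + dd.1
  let nx := s.2.1 + dd.2
  if 0 ≤ ny ∧ ny < rows ∧ 0 ≤ nx ∧ nx < cols ∧ cellAt maps ny nx ≠ 'X' then
    let t : Int × Int × Int := (ny, nx, if cellAt maps ny nx = 'L' then 1 else s.2.2)
    if PySem.Set.contains st.2 t then st else (st.1 ++ [t], PySem.Set.add st.2 t)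
  else st

def loopB (maps : List String) (rows cols : Int) (goal : Int × Int × Int) :
    Nat → List (Int × Int × Int) → List (Int × Int × Int) → Int → PySem.Set (Int × Int × Int) → Int
  | 0, _, _, _, _ => -1
  | _ + 1, [], _, _, _ => -1
  | f + 1, s :: cur, nxt, d, seen =>
    if s = goal then d
    else
      let st := pvDirs.foldl (stepB maps rows cols s) (nxt, seen)
      if cur = [] then loopB maps rows cols goal f st.1 [] (d + 1) st.2
      else loopB maps rows cols goal f cur st.1 d st.2

def startsB (maps : List String) (rows cols : Int) : List (Int × Int × Int) :=
  (PySem.List.pyRange 0 rows 1).flatMap (fun r =>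
    ((PySem.List.pyRange 0 cols 1).filter (fun c => cellAt maps r c = 'S')).map
      (fun c => (r, c, (0 : Int))))

def exitsB (maps : List String) (rows cols : Int) : List (Int × Int) :=
  (PySem.List.pyRange 0 rows 1).flatMap (fun r =>
    ((PySem.List.pyRange 0 cols 1).filter (fun c => cellAt maps r c = 'E')).map
      (fun c => (r, c)))

-- ---------- the state graph and its reachability layers ----------
def cnbrs (maps : List String) (rows cols : Int) (cells : List (Int × Int)) (bbit : Int) :
    List (Int × Int × Int) :=
  cells.filterMap (fun p =>
    if 0 ≤ p.1 ∧ p.1 < rows ∧ 0 ≤ p.2 ∧ p.2 < cols ∧ cellAt maps p.1 p.2 ≠ 'X'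
    then some (p.1, p.2, if cellAt maps p.1 p.2 = 'L' then 1 else bbit) else none)

def nbrs (maps : List String) (rows cols : Int) (s : Int × Int × Int) : List (Int × Int × Int) :=
  cnbrs maps rows cols (pvDirs.map (fun dd => (s.1 + dd.1, s.2.1 + dd.2))) s.2.2

def RL (maps : List String) (rows cols : Int) : Nat → List (Int × Int × Int)
  | 0 => startsB maps rows cols
  | n + 1 => RL maps rows cols n ++ (RL maps rows cols n).flatMap (nbrs maps rows cols)

def pvN (rows cols : Int) : Nat := (2 * (rows * cols)).toNat

def md (maps : List String) (rows cols : Int) (s : Int × Int × Int) : Nat :=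
  if h : s ∈ RL maps rows cols (pvN rows cols) then
    Nat.find (p := fun n => s ∈ RL maps rows cols n) ⟨pvN rows cols, h⟩
  else 0

def inBox (rows cols : Int) (s : Int × Int × Int) : Prop :=
  0 ≤ s.1 ∧ s.1 < rows ∧ 0 ≤ s.2.1 ∧ s.2.1 < cols ∧ (s.2.2 = 0 ∨ s.2.2 = 1)

noncomputable def boxF (rows cols : Int) : Finset (Int × Int × Int) :=
  (Finset.Icc 0 (rows - 1)) ×ˢ ((Finset.Icc 0 (cols - 1)) ×ˢ ({0, 1} : Finset Int))

-- ---------- old A-side correspondence lemmas (A's queue BFS = level BFS) ----------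
def pvAtt (d : Int) (s : Int × Int × Int) : Int × Int × Int × Int := (s.1, s.2.1, d, s.2.2)

theorem pv_step_corr (maps : List String) (row col j i l d dy dx n : Int)
    (hy : PySem.List.pyGetD pvYs n 0 = dy) (hx : PySem.List.pyGetD pvXs n 0 = dx)
    (P : List (Int × Int × Int × Int)) (acc : List (Int × Int × Int))
    (v : PySem.Set (Int × Int × Int)) :
    stepA maps row col j i d l (P ++ acc.map (pvAtt (d + 1)), v) n
      = (P ++ ((stepB maps row col (j, i, l) (acc, v) (dy, dx)).1).map (pvAtt (d + 1)),
         (stepB maps row col (j, i, l) (acc, v) (dy, dx)).2) := by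
  simp only [stepA, stepB, hy, hx]
  by_cases hv : 0 ≤ j + dy ∧ j + dy < row ∧ 0 ≤ i + dx ∧ i + dx < col ∧
      cellAt maps (j + dy) (i + dx) ≠ 'X'
  · by_cases hL : cellAt maps (j + dy) (i + dx) = 'L'
    · by_cases hm : ((j + dy, i + dx, (1 : Int)) : Int × Int × Int) ∈ v
      · simp [hv, hL, hm]
      · simp [hv, hL, hm, pvAtt]
    · by_cases hm : ((j + dy, i + dx, l) : Int × Int × Int) ∈ v
      · simp [hv, hL, hm]
      · simp [hv, hL, hm, pvAtt]
  · simp [hv]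

theorem pv_fold_corr (maps : List String) (row col j i l d : Int)
    (P : List (Int × Int × Int × Int)) (acc : List (Int × Int × Int))
    (v : PySem.Set (Int × Int × Int)) :
    (PySem.List.pyRange 0 4 1).foldl (stepA maps row col j i d l) (P ++ acc.map (pvAtt (d + 1)), v)
      = (P ++ ((pvDirs.foldl (stepB maps row col (j, i, l)) (acc, v)).1).map (pvAtt (d + 1)),
         (pvDirs.foldl (stepB maps row col (j, i, l)) (acc, v)).2) := by
  have h4 : PySem.List.pyRange 0 4 1 = [0, 1, 2, 3] := by decide
  rw [h4]
  simp only [pvDirs, List.foldl_cons, List.foldl_nil]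
  rw [pv_step_corr maps row col j i l d (-1) 0 0 (by decide) (by decide)]
  rw [pv_step_corr maps row col j i l d 1 0 1 (by decide) (by decide)]
  rw [pv_step_corr maps row col j i l d 0 (-1) 2 (by decide) (by decide)]
  rw [pv_step_corr maps row col j i l d 0 1 3 (by decide) (by decide)]

theorem pv_loop_corr (maps : List String) (row col ey ex : Int) :
    ∀ (f : Nat) (d : Int) (cur nxt : List (Int × Int × Int)) (v : PySem.Set (Int × Int × Int)),
    (cur = [] → nxt = []) →
    loopA maps row col ey ex f (cur.map (pvAtt d) ++ nxt.map (pvAtt (d + 1))) v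
      = loopB maps row col (ey, ex, 1) f cur nxt d v := by
  intro f
  induction f with
  | zero => intro d cur nxt v _; cases cur <;> rfl
  | succ f ih =>
    intro d cur nxt v h
    cases cur with
    | nil =>
      have hn := h rfl; subst hn; rfl
    | cons s cur' =>
      obtain ⟨y, x, l⟩ := s
      simp only [List.map_cons, List.cons_append, pvAtt, loopA, loopB]
      by_cases hg : y = ey ∧ x = ex ∧ l = 1
      · have hg' : ((y, x, l) : Int × Int × Int) = (ey, ex, 1) := by
          obtain ⟨h1, h2, h3⟩ := hg; subst h1 h2 h3; rfl
        simp [hg]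
      · have hg' : ((y, x, l) : Int × Int × Int) ≠ (ey, ex, 1) := by
          intro hc; apply hg
          exact ⟨congrArg Prod.fst hc, congrArg Prod.fst (congrArg Prod.snd hc),
            congrArg Prod.snd (congrArg Prod.snd hc)⟩
        simp only [hg, if_false, if_neg hg']
        rw [pv_fold_corr]
        by_cases hc : cur' = []
        · subst hc
          simp only [List.map_nil, List.nil_append]
          have := ih (d + 1)
            ((pvDirs.foldl (stepB maps row col (y, x, l)) (nxt, v)).1) []
            ((pvDirs.foldl (stepB maps row col (y, x, l)) (nxt, v)).2) (fun _ => rfl)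
          simpa using this
        · rw [if_neg hc]
          exact ih d cur'
            ((pvDirs.foldl (stepB maps row col (y, x, l)) (nxt, v)).1)
            ((pvDirs.foldl (stepB maps row col (y, x, l)) (nxt, v)).2)
            (fun hc' => absurd hc' hc)

theorem pv_getLast_cons_getD {α : Type} (l : List α) :
    ∀ (a e : α), (a :: l).getLast?.getD e = l.getLast?.getD a := by
  induction l with
  | nil => intro a e; rfl
  | cons b l' ih => intro a e; rw [List.getLast?_cons_cons, ih b e, ih b a]

theorem pv_row_corr (maps : List String) (i : Int) :
    ∀ (J : List Int) (q : List (Int × Int × Int × Int)) (v : PySem.Set (Int × Int × Int))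
      (e : Int × Int),
    J.foldl (fun st j => cellStepA maps st i j) (q, v, e)
      = (q ++ ((J.filter (fun j => cellAt maps i j = 'S')).map
            (fun j => ((i, j, (0 : Int)) : Int × Int × Int))).map (pvAtt 0),
         PySem.Set.update v ((J.filter (fun j => cellAt maps i j = 'S')).map
            (fun j => ((i, j, (0 : Int)) : Int × Int × Int))),
         ((J.filter (fun j => cellAt maps i j = 'E')).map (fun j => (i, j))).getLast?.getD e) := by
  intro J
  induction J with
  | nil => intro q v e; simp [PySem.Set.update]
  | cons j J' ihJ =>
    intro q v e
    simp only [List.foldl_cons]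
    by_cases hS : cellAt maps i j = 'S'
    · have hE : ¬ cellAt maps i j = 'E' := by rw [hS]; decide
      have hcs : cellStepA maps (q, v, e) i j
          = (q ++ [(i, j, (0 : Int), (0 : Int))], PySem.Set.add v (i, j, 0), e) := by
        simp [cellStepA, hS]
      rw [hcs, ihJ]
      simp [hS, PySem.Set.update, pvAtt]
    · by_cases hE : cellAt maps i j = 'E'
      · have hcs : cellStepA maps (q, v, e) i j = (q, v, (i, j)) := by
          simp [cellStepA, hE]
        rw [hcs, ihJ]
        simp only [List.filter_cons, hE, decide_true, if_true,
          List.map_cons, Prod.mk.injEq]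
        exact ⟨rfl, rfl, (pv_getLast_cons_getD _ _ _).symm⟩
      · have hcs : cellStepA maps (q, v, e) i j = (q, v, e) := by
          simp [cellStepA, hS, hE]
        rw [hcs, ihJ]
        simp [hS, hE]

theorem pv_scan_gen (maps : List String) (col : Int) :
    ∀ (I : List Int) (q : List (Int × Int × Int × Int)) (v : PySem.Set (Int × Int × Int))
      (e : Int × Int),
    I.foldl (fun st i => (PySem.List.pyRange 0 col 1).foldl (fun st j => cellStepA maps st i j) st)
        (q, v, e)
      = (q ++ (I.flatMap (fun i => ((PySem.List.pyRange 0 col 1).filter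
              (fun j => cellAt maps i j = 'S')).map
              (fun j => ((i, j, (0 : Int)) : Int × Int × Int)))).map (pvAtt 0),
         PySem.Set.update v (I.flatMap (fun i => ((PySem.List.pyRange 0 col 1).filter
              (fun j => cellAt maps i j = 'S')).map
              (fun j => ((i, j, (0 : Int)) : Int × Int × Int)))),
         (I.flatMap (fun i => ((PySem.List.pyRange 0 col 1).filter
              (fun j => cellAt maps i j = 'E')).map (fun j => ((i, j) : Int × Int)))).getLast?.getD e) := by
  intro I
  induction I with
  | nil => intro q v e; simp [PySem.Set.update]
  | cons i I' ihI =>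
    intro q v e
    simp only [List.foldl_cons]
    rw [pv_row_corr maps i (PySem.List.pyRange 0 col 1) q v e, ihI]
    simp only [List.flatMap_cons, List.map_append, PySem.Set.update, List.foldl_append,
      List.append_assoc, Prod.mk.injEq]
    refine ⟨trivial, trivial, ?_⟩
    rw [List.getLast?_append]
    cases hl : (I'.flatMap (fun i => ((PySem.List.pyRange 0 col 1).filter
        (fun j => cellAt maps i j = 'E')).map (fun j => ((i, j) : Int × Int)))).getLast? with
    | none => simp
    | some a => simp

theorem pv_scan_corr (maps : List String) (row col : Int) :
    scanA maps row col
      = ((startsB maps row col).map (pvAtt 0), PySem.Set.ofList (startsB maps row col),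
         (exitsB maps row col).getLast?.getD (-1, -1)) := by
  unfold scanA startsB exitsB
  rw [pv_scan_gen maps col (PySem.List.pyRange 0 row 1) [] PySem.Set.empty (-1, -1)]
  simp [PySem.Set.ofList_eq_foldl, PySem.Set.update, PySem.Set.empty]


-- ---------- basic facts about the reachability layers ----------
theorem RL_succ_iff (maps : List String) (rows cols : Int) (n : Nat) (t : Int × Int × Int) :
    t ∈ RL maps rows cols (n + 1)
      ↔ t ∈ RL maps rows cols n ∨ ∃ p ∈ RL maps rows cols n, t ∈ nbrs maps rows cols p := by
  simp [RL, List.mem_append, List.mem_flatMap]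

theorem RL_mono (maps : List String) (rows cols : Int) {t : Int × Int × Int} :
    ∀ {n m : Nat}, n ≤ m → t ∈ RL maps rows cols n → t ∈ RL maps rows cols m := by
  intro n m
  induction m with
  | zero => intro h ht; rwa [Nat.le_zero.mp h] at ht
  | succ m ih =>
    intro h ht
    by_cases h' : n = m + 1
    · rwa [h'] at ht
    · exact (RL_succ_iff maps rows cols m _).mpr (Or.inl (ih (by omega) ht))

theorem RL_stable_of (maps : List String) (rows cols : Int) (d : Nat)
    (h : ∀ t, t ∈ RL maps rows cols (d + 1) → t ∈ RL maps rows cols d) :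
    ∀ m t, t ∈ RL maps rows cols m → t ∈ RL maps rows cols d := by
  intro m
  induction m with
  | zero => intro t ht; exact RL_mono maps rows cols (Nat.zero_le d) ht
  | succ m ih =>
    intro t ht
    rcases (RL_succ_iff maps rows cols m t).mp ht with h1 | ⟨p, hp, hn⟩
    · exact ih t h1
    · exact h t ((RL_succ_iff maps rows cols d t).mpr (Or.inr ⟨p, ih p hp, hn⟩))

theorem mem_cnbrs (maps : List String) (rows cols : Int) (cells : List (Int × Int)) (b : Int)
    (t : Int × Int × Int) :
    t ∈ cnbrs maps rows cols cells b
      ↔ ∃ p ∈ cells, (0 ≤ p.1 ∧ p.1 < rows ∧ 0 ≤ p.2 ∧ p.2 < cols ∧ cellAt maps p.1 p.2 ≠ 'X')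
          ∧ t = (p.1, p.2, if cellAt maps p.1 p.2 = 'L' then 1 else b) := by
  simp only [cnbrs, List.mem_filterMap]
  constructor
  · rintro ⟨p, hp, he⟩
    by_cases hv : 0 ≤ p.1 ∧ p.1 < rows ∧ 0 ≤ p.2 ∧ p.2 < cols ∧ cellAt maps p.1 p.2 ≠ 'X'
    · rw [if_pos hv] at he; exact ⟨p, hp, hv, (Option.some_inj.mp he).symm⟩
    · rw [if_neg hv] at he; exact absurd he (by simp)
  · rintro ⟨p, hp, hv, he⟩
    exact ⟨p, hp, by rw [if_pos hv, he]⟩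

theorem cnbrs_cell_mem (maps : List String) (rows cols : Int) (cells : List (Int × Int)) (b : Int)
    {t : Int × Int × Int} (h : t ∈ cnbrs maps rows cols cells b) : (t.1, t.2.1) ∈ cells := by
  rcases (mem_cnbrs maps rows cols cells b t).mp h with ⟨p, hp, _, he⟩
  subst he; exact hp

theorem cnbrs_nodup (maps : List String) (rows cols : Int) (b : Int) :
    ∀ (cells : List (Int × Int)), cells.Nodup → (cnbrs maps rows cols cells b).Nodup := by
  intro cells
  induction cells with
  | nil => intro _; simp [cnbrs]
  | cons p cells ih =>
    intro hnd
    rw [List.nodup_cons] at hnd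
    show ((p :: cells).filterMap _).Nodup
    rw [List.filterMap_cons]
    split
    · exact ih hnd.2
    · rename_i t he
      refine List.nodup_cons.mpr ⟨?_, ih hnd.2⟩
      intro hmem
      have hc := cnbrs_cell_mem maps rows cols cells b hmem
      have : (t.1, t.2.1) = p := by
        by_cases hv : 0 ≤ p.1 ∧ p.1 < rows ∧ 0 ≤ p.2 ∧ p.2 < cols ∧ cellAt maps p.1 p.2 ≠ 'X'
        · rw [if_pos hv] at he
          have := Option.some_inj.mp he
          subst this; rfl
        · rw [if_neg hv] at he; exact absurd he (by simp)
      exact hnd.1 (this ▸ hc)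

theorem pv_cells_nodup (a b : Int) :
    ([(a - 1, b), (a + 1, b), (a, b - 1), (a, b + 1)] : List (Int × Int)).Nodup := by
  simp only [List.nodup_cons, List.mem_cons, List.mem_singleton, List.not_mem_nil,
    List.nodup_nil, Prod.mk.injEq, not_or, and_true, not_false_eq_true]
  omega

theorem pv_dirs_cells (a b : Int) :
    pvDirs.map (fun dd => (a + dd.1, b + dd.2))
      = [(a - 1, b), (a + 1, b), (a, b - 1), (a, b + 1)] := by
  simp [pvDirs, sub_eq_add_neg]

theorem nbrs_nodup (maps : List String) (rows cols : Int) (s : Int × Int × Int) :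
    (nbrs maps rows cols s).Nodup := by
  unfold nbrs
  rw [pv_dirs_cells]
  exact cnbrs_nodup maps rows cols s.2.2 _ (pv_cells_nodup s.1 s.2.1)

theorem mem_startsB (maps : List String) (rows cols : Int) (t : Int × Int × Int) :
    t ∈ startsB maps rows cols
      ↔ (0 ≤ t.1 ∧ t.1 < rows ∧ 0 ≤ t.2.1 ∧ t.2.1 < cols ∧ t.2.2 = 0
          ∧ cellAt maps t.1 t.2.1 = 'S') := by
  obtain ⟨r, c, b⟩ := t
  simp only [startsB, List.mem_flatMap, List.mem_map, List.mem_filter]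
  constructor
  · rintro ⟨r', hr', c', ⟨hc', hS⟩, he⟩
    obtain ⟨h1, h2, h3⟩ := Prod.mk.injEq .. ▸ he
    cases he
    have hr2 := (PySem.List.mem_pyRange_one).mp hr'
    have hc2 := (PySem.List.mem_pyRange_one).mp hc'
    exact ⟨by omega, by omega, by omega, by omega, rfl, by simpa using hS⟩
  · rintro ⟨h1, h2, h3, h4, h5, h6⟩
    subst h5
    exact ⟨r, (PySem.List.mem_pyRange_one).mpr ⟨h1, h2⟩,
      c, ⟨(PySem.List.mem_pyRange_one).mpr ⟨h3, h4⟩, by simpa using h6⟩, rfl⟩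

theorem nbrs_inBox (maps : List String) (rows cols : Int) {s t : Int × Int × Int}
    (hs : s.2.2 = 0 ∨ s.2.2 = 1) (ht : t ∈ nbrs maps rows cols s) : inBox rows cols t := by
  rcases (mem_cnbrs maps rows cols _ _ t).mp ht with ⟨p, _, hv, he⟩
  subst he
  refine ⟨hv.1, hv.2.1, hv.2.2.1, hv.2.2.2.1, ?_⟩
  by_cases hL : cellAt maps p.1 p.2 = 'L' <;> simp [hL, hs]

theorem RL_inBox (maps : List String) (rows cols : Int) :
    ∀ n t, t ∈ RL maps rows cols n → inBox rows cols t := by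
  intro n
  induction n with
  | zero =>
    intro t ht
    have h := (mem_startsB maps rows cols t).mp ht
    exact ⟨h.1, h.2.1, h.2.2.1, h.2.2.2.1, Or.inl h.2.2.2.2.1⟩
  | succ n ih =>
    intro t ht
    rcases (RL_succ_iff maps rows cols n t).mp ht with h1 | ⟨p, hp, hn⟩
    · exact ih t h1
    · exact nbrs_inBox maps rows cols (ih p hp).2.2.2.2 hn

theorem inBox_mem_boxF (rows cols : Int) (t : Int × Int × Int) :
    inBox rows cols t ↔ t ∈ boxF rows cols := by
  obtain ⟨r, c, b⟩ := t
  simp only [inBox, boxF, Finset.mem_product, Finset.mem_Icc, Finset.mem_insert,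
    Finset.mem_singleton]
  constructor
  · rintro ⟨h1, h2, h3, h4, h5⟩; exact ⟨⟨h1, by omega⟩, ⟨h3, by omega⟩, h5⟩
  · rintro ⟨⟨h1, h2⟩, ⟨h3, h4⟩, h5⟩; exact ⟨h1, by omega, h3, by omega, h5⟩

theorem boxF_card (rows cols : Int) (hr : 0 ≤ rows) (hc : 0 ≤ cols) :
    (boxF rows cols).card = pvN rows cols := by
  lift rows to Nat using hr with a
  lift cols to Nat using hc with b
  simp only [boxF, pvN, Finset.card_product, Int.card_Icc]
  have h1 : ((a : Int) - 1 + 1 - 0).toNat = a := by omega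
  have h2 : ((b : Int) - 1 + 1 - 0).toNat = b := by omega
  have h3 : ({0, 1} : Finset Int).card = 2 := by decide
  rw [h1, h2, h3]
  have : (2 * ((a : Int) * (b : Int))) = ((2 * (a * b) : Nat) : Int) := by push_cast; ring
  rw [this, Int.toNat_natCast]
  ring

theorem RL_card_le (maps : List String) (rows cols : Int) (hr : 0 ≤ rows) (hc : 0 ≤ cols)
    (n : Nat) : ((RL maps rows cols n).toFinset).card ≤ pvN rows cols := by
  rw [← boxF_card rows cols hr hc]
  apply Finset.card_le_card
  intro t ht
  rw [List.mem_toFinset] at ht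
  exact (inBox_mem_boxF rows cols t).mp (RL_inBox maps rows cols n t ht)

theorem RL_grow (maps : List String) (rows cols : Int) :
    ∀ n, (∀ k, k < n → ¬ (∀ t, t ∈ RL maps rows cols (k + 1) → t ∈ RL maps rows cols k)) →
      n ≤ ((RL maps rows cols n).toFinset).card := by
  intro n
  induction n with
  | zero => intro _; exact Nat.zero_le _
  | succ n ih =>
    intro h
    have hn := ih (fun k hk => h k (by omega))
    have hne := h n (by omega)
    push_neg at hne
    obtain ⟨t, ht1, ht0⟩ := hne
    have hss : (RL maps rows cols n).toFinset ⊂ (RL maps rows cols (n + 1)).toFinset := by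
      constructor
      · intro x hx
        rw [List.mem_toFinset] at *
        exact RL_mono maps rows cols (Nat.le_succ n) hx
      · intro hsub
        exact ht0 (List.mem_toFinset.mp (hsub (List.mem_toFinset.mpr ht1)))
    have := Finset.card_lt_card hss
    omega

theorem RL_le_top (maps : List String) (rows cols : Int) (hr : 0 ≤ rows) (hc : 0 ≤ cols) :
    ∀ n t, t ∈ RL maps rows cols n → t ∈ RL maps rows cols (pvN rows cols) := by
  by_cases hstab : ∃ k, k ≤ pvN rows cols ∧
      (∀ t, t ∈ RL maps rows cols (k + 1) → t ∈ RL maps rows cols k)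
  · obtain ⟨k, hk, hs⟩ := hstab
    intro n t ht
    exact RL_mono maps rows cols hk (RL_stable_of maps rows cols k hs n t ht)
  · exfalso
    push_neg at hstab
    have h := RL_grow maps rows cols (pvN rows cols + 1) (by
      intro k hk hall
      obtain ⟨t, ht1, ht0⟩ := hstab k (by omega)
      exact ht0 (hall t ht1))
    have h2 := RL_card_le maps rows cols hr hc (pvN rows cols + 1)
    omega

-- md: the layer index at which a state first appears (0 for unreachable states)
theorem md_le (maps : List String) (rows cols : Int) (hr : 0 ≤ rows) (hc : 0 ≤ cols)
    {n : Nat} {s : Int × Int × Int} (h : s ∈ RL maps rows cols n) :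
    md maps rows cols s ≤ n := by
  have htop := RL_le_top maps rows cols hr hc n s h
  rw [md, dif_pos htop]
  exact Nat.find_min' _ h

theorem md_mem (maps : List String) (rows cols : Int) {s : Int × Int × Int}
    (h : s ∈ RL maps rows cols (pvN rows cols)) :
    s ∈ RL maps rows cols (md maps rows cols s) := by
  rw [md, dif_pos h]
  exact Nat.find_spec (p := fun n => s ∈ RL maps rows cols n) ⟨pvN rows cols, h⟩

theorem md_frontier (maps : List String) (rows cols : Int) (hr : 0 ≤ rows) (hc : 0 ≤ cols)
    {d : Nat} {t : Int × Int × Int} (h1 : t ∈ RL maps rows cols (d + 1))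
    (h0 : t ∉ RL maps rows cols d) : md maps rows cols t = d + 1 := by
  have hle := md_le maps rows cols hr hc h1
  have htop := RL_le_top maps rows cols hr hc (d + 1) t h1
  rcases Nat.lt_or_ge (md maps rows cols t) (d + 1) with hlt | hge
  · exact absurd (RL_mono maps rows cols (by omega) (md_mem maps rows cols htop)) h0
  · omega

theorem md_nbr_le (maps : List String) (rows cols : Int) (hr : 0 ≤ rows) (hc : 0 ≤ cols)
    {p t : Int × Int × Int} (hp : p ∈ RL maps rows cols (pvN rows cols))
    (hn : t ∈ nbrs maps rows cols p) :
    md maps rows cols t ≤ md maps rows cols p + 1 := by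
  have : t ∈ RL maps rows cols (md maps rows cols p + 1) :=
    (RL_succ_iff maps rows cols _ t).mpr (Or.inr ⟨p, md_mem maps rows cols hp, hn⟩)
  exact md_le maps rows cols hr hc this


-- ---------- the level loop expands a popped state by its fresh neighbours ----------
theorem pv_contains_append_ne {α : Type} [BEq α] [LawfulBEq α] (l : List α) (t u : α)
    (h : u ≠ t) : PySem.Set.contains (l ++ [t]) u = PySem.Set.contains l u := by
  by_cases hb : u ∈ l
  · rw [(PySem.Set.contains_iff _ _).mpr (by simp [hb]),
        (PySem.Set.contains_iff _ _).mpr hb]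
  · have h1 : PySem.Set.contains (l ++ [t]) u ≠ true := fun hc => by
      rcases (by simpa using (PySem.Set.contains_iff _ _).mp hc : u ∈ l ∨ u = t) with h' | h'
      exacts [hb h', h h']
    have h2 : PySem.Set.contains l u ≠ true := fun hc => hb ((PySem.Set.contains_iff _ _).mp hc)
    rw [Bool.eq_false_iff.mpr h1, Bool.eq_false_iff.mpr h2]

theorem cnbrs_cons (maps : List String) (rows cols : Int) (p : Int × Int)
    (cells : List (Int × Int)) (b : Int) :
    cnbrs maps rows cols (p :: cells) b
      = (if 0 ≤ p.1 ∧ p.1 < rows ∧ 0 ≤ p.2 ∧ p.2 < cols ∧ cellAt maps p.1 p.2 ≠ 'X'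
          then [(p.1, p.2, if cellAt maps p.1 p.2 = 'L' then 1 else b)] else [])
        ++ cnbrs maps rows cols cells b := by
  by_cases hv : 0 ≤ p.1 ∧ p.1 < rows ∧ 0 ≤ p.2 ∧ p.2 < cols ∧ cellAt maps p.1 p.2 ≠ 'X'
  · simp only [cnbrs, List.filterMap_cons, if_pos hv]
    rfl
  · simp only [cnbrs, List.filterMap_cons, if_neg hv]
    rfl

theorem stepB_fold_aux (maps : List String) (rows cols : Int) (s : Int × Int × Int) :
    ∀ (ds : List (Int × Int)) (nxt seen : List (Int × Int × Int)),
    (cnbrs maps rows cols (ds.map (fun dd => (s.1 + dd.1, s.2.1 + dd.2))) s.2.2).Nodup →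
    ds.foldl (stepB maps rows cols s) (nxt, seen)
      = (nxt ++ (cnbrs maps rows cols (ds.map (fun dd => (s.1 + dd.1, s.2.1 + dd.2))) s.2.2).filter
            (fun t => !PySem.Set.contains seen t),
         seen ++ (cnbrs maps rows cols (ds.map (fun dd => (s.1 + dd.1, s.2.1 + dd.2))) s.2.2).filter
            (fun t => !PySem.Set.contains seen t)) := by
  intro ds
  induction ds with
  | nil => intro nxt seen _; simp [cnbrs]
  | cons dd tl ih =>
    intro nxt seen hnd
    rw [List.map_cons, cnbrs_cons] at hnd ⊢
    rw [List.foldl_cons]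
    by_cases hv : 0 ≤ s.1 + dd.1 ∧ s.1 + dd.1 < rows ∧ 0 ≤ s.2.1 + dd.2 ∧ s.2.1 + dd.2 < cols ∧
        cellAt maps (s.1 + dd.1) (s.2.1 + dd.2) ≠ 'X'
    · rw [if_pos hv] at hnd ⊢
      set t : Int × Int × Int :=
        (s.1 + dd.1, s.2.1 + dd.2,
          if cellAt maps (s.1 + dd.1) (s.2.1 + dd.2) = 'L' then 1 else s.2.2) with hts
      rw [List.singleton_append] at hnd ⊢
      rw [List.nodup_cons] at hnd
      have hiff := PySem.Set.contains_iff seen t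
      by_cases hmem : t ∈ seen
      · have hm : PySem.Set.contains seen t = true := hiff.mpr hmem
        have hstep : stepB maps rows cols s (nxt, seen) dd = (nxt, seen) := by
          simp only [stepB, ← hts, if_pos hv, PySem.Set.add]
          simp [hm, hmem]
        rw [hstep,
          List.filter_cons_of_neg (p := fun u => !PySem.Set.contains seen u) (a := t)
            (by simp [hmem]),
          ih nxt seen hnd.2]
      · have hm : PySem.Set.contains seen t = false :=
          Bool.eq_false_iff.mpr (fun hx => hmem (hiff.mp hx))
        have hstep : stepB maps rows cols s (nxt, seen) dd = (nxt ++ [t], seen ++ [t]) := by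
          simp only [stepB, ← hts, if_pos hv, PySem.Set.add]
          simp [hm, hmem]
        rw [hstep,
          List.filter_cons_of_pos (p := fun u => !PySem.Set.contains seen u) (a := t)
            (by simp [hmem]),
          ih (nxt ++ [t]) (seen ++ [t]) hnd.2]
        have hfe : (cnbrs maps rows cols (tl.map fun dd => (s.1 + dd.1, s.2.1 + dd.2)) s.2.2).filter
              (fun u => !PySem.Set.contains (seen ++ [t]) u)
            = (cnbrs maps rows cols (tl.map fun dd => (s.1 + dd.1, s.2.1 + dd.2)) s.2.2).filter
              (fun u => !PySem.Set.contains seen u) := by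
          apply List.filter_congr
          intro u hu
          have hne : u ≠ t := fun he => hnd.1 (he ▸ hu)
          rw [pv_contains_append_ne seen t u hne]
        rw [hfe]
        simp [List.append_assoc]
    · rw [if_neg hv] at hnd ⊢
      rw [List.nil_append] at hnd ⊢
      have hstep : stepB maps rows cols s (nxt, seen) dd = (nxt, seen) := by
        simp only [stepB, if_neg hv]
      rw [hstep, ih nxt seen hnd]

theorem stepB_fold (maps : List String) (rows cols : Int) (s : Int × Int × Int)
    (nxt seen : List (Int × Int × Int)) :
    pvDirs.foldl (stepB maps rows cols s) (nxt, seen)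
      = (nxt ++ (nbrs maps rows cols s).filter (fun t => !PySem.Set.contains seen t),
         seen ++ (nbrs maps rows cols s).filter (fun t => !PySem.Set.contains seen t)) :=
  stepB_fold_aux maps rows cols s pvDirs nxt seen
    (by rw [show (cnbrs maps rows cols (pvDirs.map (fun dd => (s.1 + dd.1, s.2.1 + dd.2))) s.2.2)
          = nbrs maps rows cols s from rfl]
        exact nbrs_nodup maps rows cols s)

theorem pv_mem_filter_not_contains {l seen : List (Int × Int × Int)} {t : Int × Int × Int} :
    t ∈ l.filter (fun u => !PySem.Set.contains seen u) ↔ t ∈ l ∧ t ∉ seen := by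
  rw [List.mem_filter]
  simp

-- ---------- correctness of the level-synchronised BFS ----------
theorem levelLoop_correct (maps : List String) (rows cols : Int) (hr : 0 ≤ rows)
    (hc : 0 ≤ cols) (g : Int × Int × Int) :
    ∀ (f : Nat) (d : Nat) (cur nxt seen : List (Int × Int × Int)),
    (∀ s ∈ cur, s ∈ RL maps rows cols d ∧ md maps rows cols s = d) →
    (∀ t ∈ nxt, t ∈ RL maps rows cols (d + 1) ∧ md maps rows cols t = d + 1) →
    nxt.Nodup →
    seen.Nodup →
    (∀ t, t ∈ seen ↔ (t ∈ RL maps rows cols d ∨ t ∈ nxt)) →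
    (∀ t, t ∈ RL maps rows cols (d + 1) → t ∉ RL maps rows cols d →
        (t ∈ nxt ∨ ∃ p ∈ cur, t ∈ nbrs maps rows cols p)) →
    (g ∈ RL maps rows cols d → g ∈ cur) →
    (∀ k, k < d → g ∉ RL maps rows cols k) →
    (cur = [] → nxt = []) →
    (cur.length + nxt.length
        + (((RL maps rows cols (pvN rows cols)).toFinset) \ seen.toFinset).card + 1 ≤ f) →
    loopB maps rows cols g f cur nxt (d : Int) seen
      = (if g ∈ RL maps rows cols (pvN rows cols)
          then ((md maps rows cols g : Nat) : Int) else -1) := by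
  intro f
  induction f with
  | zero => intro d cur nxt seen _ _ _ _ _ _ _ _ _ hf; omega
  | succ f ih =>
    intro d cur nxt seen H1 H3 H4 H5 Hseen H6 H7 H7b H0 Hf
    cases cur with
    | nil =>
      have hnx := H0 rfl
      subst hnx
      have hL : loopB maps rows cols g (f + 1) [] [] (d : Int) seen = -1 := rfl
      rw [hL, if_neg]
      intro hg
      have hstab : ∀ t, t ∈ RL maps rows cols (d + 1) → t ∈ RL maps rows cols d := by
        intro t ht
        by_cases h0 : t ∈ RL maps rows cols d
        · exact h0
        · rcases H6 t ht h0 with h | ⟨p, hp, _⟩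
          · exact absurd h (by simp)
          · exact absurd hp (by simp)
      exact absurd (H7 (RL_stable_of maps rows cols d hstab _ g hg)) (by simp)
    | cons s cur' =>
      have hs := H1 s (by simp)
      by_cases hg : s = g
      · have hL : loopB maps rows cols g (f + 1) (s :: cur') nxt (d : Int) seen = (d : Int) := by
          simp [loopB, hg]
        rw [hL, if_pos (RL_le_top maps rows cols hr hc d g (hg ▸ hs.1))]
        rw [show md maps rows cols g = d from hg ▸ hs.2]
      · set fr := (nbrs maps rows cols s).filter (fun t => !PySem.Set.contains seen t) with hfr
        have hfold := stepB_fold maps rows cols s nxt seen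
        rw [← hfr] at hfold
        have hLB : loopB maps rows cols g (f + 1) (s :: cur') nxt (d : Int) seen
            = if cur' = [] then
                loopB maps rows cols g f (nxt ++ fr) [] ((d : Int) + 1) (seen ++ fr)
              else loopB maps rows cols g f cur' (nxt ++ fr) (d : Int) (seen ++ fr) := by
          simp only [loopB, if_neg hg, hfold]
        have hfrmem : ∀ t ∈ fr, t ∈ nbrs maps rows cols s ∧ t ∉ seen := by
          intro t ht
          rw [hfr] at ht
          exact pv_mem_filter_not_contains.mp ht
        have hfrRL : ∀ t ∈ fr, t ∈ RL maps rows cols (d + 1) := fun t ht =>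
          (RL_succ_iff maps rows cols d t).mpr (Or.inr ⟨s, hs.1, (hfrmem t ht).1⟩)
        have hfrNd : ∀ t ∈ fr, t ∉ RL maps rows cols d := fun t ht hm =>
          (hfrmem t ht).2 ((Hseen t).mpr (Or.inl hm))
        have hfrmd : ∀ t ∈ fr, md maps rows cols t = d + 1 := fun t ht =>
          md_frontier maps rows cols hr hc (hfrRL t ht) (hfrNd t ht)
        have hfrNodup : fr.Nodup := by
          rw [hfr]; exact List.Nodup.filter _ (nbrs_nodup maps rows cols s)
        have hfrNxt : ∀ t ∈ fr, t ∉ nxt := fun t ht hm =>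
          (hfrmem t ht).2 ((Hseen t).mpr (Or.inr hm))
        have H3' : ∀ t ∈ nxt ++ fr,
            t ∈ RL maps rows cols (d + 1) ∧ md maps rows cols t = d + 1 := by
          intro t ht
          rcases List.mem_append.mp ht with h | h
          · exact H3 t h
          · exact ⟨hfrRL t h, hfrmd t h⟩
        have H4' : (nxt ++ fr).Nodup :=
          List.Nodup.append H4 hfrNodup (fun a ha hb => hfrNxt a hb ha)
        have H5' : (seen ++ fr).Nodup :=
          List.Nodup.append H5 hfrNodup (fun a ha hb => (hfrmem a hb).2 ha)
        have Hseen' : ∀ t, t ∈ seen ++ fr ↔ (t ∈ RL maps rows cols d ∨ t ∈ nxt ++ fr) := by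
          intro t
          rw [List.mem_append, List.mem_append, Hseen t]
          tauto
        have Hdisc : ∀ t, t ∈ RL maps rows cols (d + 1) → t ∉ RL maps rows cols d →
            t ∈ nbrs maps rows cols s → t ∈ nxt ++ fr := by
          intro t h1 h0 hn
          by_cases hsn : t ∈ seen
          · rcases (Hseen t).mp hsn with h | h
            · exact absurd h h0
            · exact List.mem_append.mpr (Or.inl h)
          · refine List.mem_append.mpr (Or.inr ?_)
            rw [hfr]
            exact pv_mem_filter_not_contains.mpr ⟨hn, hsn⟩
        have hfrRS : fr.toFinset
            ⊆ (RL maps rows cols (pvN rows cols)).toFinset \ seen.toFinset := by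
          intro t ht
          rw [List.mem_toFinset] at ht
          rw [Finset.mem_sdiff, List.mem_toFinset, List.mem_toFinset]
          exact ⟨RL_le_top maps rows cols hr hc (d + 1) t (hfrRL t ht), (hfrmem t ht).2⟩
        have hcardfr : fr.toFinset.card = fr.length := List.toFinset_card_of_nodup hfrNodup
        have hsd : (RL maps rows cols (pvN rows cols)).toFinset \ (seen ++ fr).toFinset
            = ((RL maps rows cols (pvN rows cols)).toFinset \ seen.toFinset) \ fr.toFinset := by
          ext x
          simp only [Finset.mem_sdiff, List.toFinset_append, Finset.mem_union]
          tauto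
        have hcard : ((RL maps rows cols (pvN rows cols)).toFinset \ (seen ++ fr).toFinset).card
            = ((RL maps rows cols (pvN rows cols)).toFinset \ seen.toFinset).card - fr.length := by
          rw [hsd, Finset.card_sdiff, Finset.inter_eq_left.mpr hfrRS, hcardfr]
        have hcardle : fr.length
            ≤ ((RL maps rows cols (pvN rows cols)).toFinset \ seen.toFinset).card := by
          rw [← hcardfr]
          exact Finset.card_le_card hfrRS
        rw [hLB]
        by_cases hc' : cur' = []
        · subst hc'
          rw [if_pos rfl]
          have hcast : ((d : Int) + 1) = ((d + 1 : Nat) : Int) := by push_cast; ring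
          rw [hcast]
          apply ih (d + 1) (nxt ++ fr) [] (seen ++ fr) H3' (by simp) List.nodup_nil H5'
          · intro t
            constructor
            · intro ht
              left
              rcases List.mem_append.mp ht with h | h
              · rcases (Hseen t).mp h with h' | h'
                · exact RL_mono maps rows cols (Nat.le_succ d) h'
                · exact (H3 t h').1
              · exact hfrRL t h
            · intro ht
              rcases ht with ht | ht
              · by_cases h0 : t ∈ RL maps rows cols d
                · exact List.mem_append.mpr (Or.inl ((Hseen t).mpr (Or.inl h0)))
                · rcases H6 t ht h0 with h | ⟨p, hp, hn⟩
                  · exact List.mem_append.mpr (Or.inl ((Hseen t).mpr (Or.inr h)))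
                  · have hp' : p = s := by
                      rcases List.mem_cons.mp hp with h' | h'
                      · exact h'
                      · exact absurd h' (by simp)
                    subst hp'
                    rcases List.mem_append.mp (Hdisc t ht h0 hn) with h' | h'
                    · exact List.mem_append.mpr (Or.inl ((Hseen t).mpr (Or.inr h')))
                    · exact List.mem_append.mpr (Or.inr h')
              · exact absurd ht (by simp)
          · intro t h1 h0
            right
            rcases (RL_succ_iff maps rows cols (d + 1) t).mp h1 with h | ⟨p, hp, hn⟩
            · exact absurd h h0
            · by_cases hpd : p ∈ RL maps rows cols d
              · exact absurd ((RL_succ_iff maps rows cols d t).mpr (Or.inr ⟨p, hpd, hn⟩)) h0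
              · rcases H6 p hp hpd with h' | ⟨q, hq, hqn⟩
                · exact ⟨p, List.mem_append.mpr (Or.inl h'), hn⟩
                · have hq' : q = s := by
                    rcases List.mem_cons.mp hq with h'' | h''
                    · exact h''
                    · exact absurd h'' (by simp)
                  subst hq'
                  exact ⟨p, Hdisc p hp hpd hqn, hn⟩
          · intro hgm
            by_cases h0 : g ∈ RL maps rows cols d
            · rcases List.mem_cons.mp (H7 h0) with h' | h'
              · exact absurd h'.symm hg
              · exact absurd h' (by simp)
            · rcases H6 g hgm h0 with h | ⟨p, hp, hn⟩
              · exact List.mem_append.mpr (Or.inl h)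
              · have hp' : p = s := by
                  rcases List.mem_cons.mp hp with h' | h'
                  · exact h'
                  · exact absurd h' (by simp)
                subst hp'
                exact Hdisc g hgm h0 hn
          · intro k hk
            by_cases hkd : k < d
            · exact H7b k hkd
            · have hkd' : k = d := by omega
              subst hkd'
              intro hgm
              rcases List.mem_cons.mp (H7 hgm) with h' | h'
              · exact hg h'.symm
              · exact absurd h' (by simp)
          · intro _
            rfl
          · simp only [List.length_append, List.length_nil, List.length_cons] at Hf ⊢
            omega
        · rw [if_neg hc']
          apply ih d cur' (nxt ++ fr) (seen ++ fr)
            (fun t ht => H1 t (by simp [ht])) H3' H4' H5' Hseen'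
          · intro t h1 h0
            rcases H6 t h1 h0 with h | ⟨p, hp, hn⟩
            · exact Or.inl (List.mem_append.mpr (Or.inl h))
            · rcases List.mem_cons.mp hp with h' | h'
              · subst h'
                exact Or.inl (Hdisc t h1 h0 hn)
              · exact Or.inr ⟨p, h', hn⟩
          · intro hgm
            rcases List.mem_cons.mp (H7 hgm) with h' | h'
            · exact absurd h'.symm hg
            · exact h'
          · exact H7b
          · intro h
            exact absurd h hc'
          · simp only [List.length_append, List.length_cons] at Hf ⊢
            omega


-- ---------- the relaxation round computes a pointwise minimum ----------
def fmin (a : Option Int) (l : List Int) : Option Int :=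
  l.foldl (fun a v => match a with | none => some v | some x => some (min x v)) a

theorem fmin_append (a : Option Int) (l1 l2 : List Int) :
    fmin a (l1 ++ l2) = fmin (fmin a l1) l2 := by
  simp [fmin, List.foldl_append]

theorem fmin_nil (a : Option Int) : fmin a [] = a := rfl

theorem fmin_some_isSome : ∀ (l : List Int) (x : Int), ∃ w, fmin (some x) l = some w := by
  intro l
  induction l with
  | nil => intro x; exact ⟨x, rfl⟩
  | cons v tl ih => intro x; exact ih (min x v)

theorem fmin_cons_isSome (v : Int) (tl : List Int) (a : Option Int) :
    ∃ w, fmin a (v :: tl) = some w := by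
  cases a with
  | none => exact fmin_some_isSome tl v
  | some x => exact fmin_some_isSome tl (min x v)

theorem fmin_le : ∀ (l : List Int) (a : Option Int) (w : Int), fmin a l = some w →
    (∀ x, a = some x → w ≤ x) ∧ (∀ v ∈ l, w ≤ v) := by
  intro l
  induction l with
  | nil =>
    intro a w h
    refine ⟨fun x hx => ?_, fun v hv => absurd hv (by simp)⟩
    rw [fmin_nil, hx] at h
    exact le_of_eq (Option.some_inj.mp h).symm
  | cons v tl ih =>
    intro a w h
    cases a with
    | none =>
      have hstep : fmin none (v :: tl) = fmin (some v) tl := rfl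
      rw [hstep] at h
      have hh := ih (some v) w h
      refine ⟨fun x hx => absurd hx (by simp), fun u hu => ?_⟩
      rcases List.mem_cons.mp hu with h' | h'
      · exact h' ▸ hh.1 v rfl
      · exact hh.2 u h'
    | some x =>
      have hstep : fmin (some x) (v :: tl) = fmin (some (min x v)) tl := rfl
      rw [hstep] at h
      have hh := ih (some (min x v)) w h
      have hwm := hh.1 (min x v) rfl
      refine ⟨fun y hy => ?_, fun u hu => ?_⟩
      · have hxy : x = y := Option.some_inj.mp hy
        have h1 := min_le_left x v
        omega
      · rcases List.mem_cons.mp hu with h' | h'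
        · subst h'
          have := min_le_right x u
          omega
        · exact hh.2 u h'

theorem fmin_mem : ∀ (l : List Int) (a : Option Int) (w : Int), fmin a l = some w →
    a = some w ∨ w ∈ l := by
  intro l
  induction l with
  | nil => intro a w h; exact Or.inl h
  | cons v tl ih =>
    intro a w h
    cases a with
    | none =>
      have hstep : fmin none (v :: tl) = fmin (some v) tl := rfl
      rw [hstep] at h
      rcases ih (some v) w h with h' | h'
      · exact Or.inr (by simp [Option.some_inj.mp h'])
      · exact Or.inr (List.mem_cons.mpr (Or.inr h'))
    | some x =>
      have hstep : fmin (some x) (v :: tl) = fmin (some (min x v)) tl := rfl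
      rw [hstep] at h
      rcases ih (some (min x v)) w h with h' | h'
      · have hw := Option.some_inj.mp h'
        rcases min_cases x v with ⟨he, _⟩ | ⟨he, _⟩
        · exact Or.inl (by rw [← hw, he])
        · exact Or.inr (List.mem_cons.mpr (Or.inl (by omega)))
      · exact Or.inr (List.mem_cons.mpr (Or.inr h'))

def contribs (maps : List String) (rows cols : Int) (D : (Int × Int × Int) → Option Int)
    (ps : List (Int × Int × Int)) (t : Int × Int × Int) : List Int :=
  ps.filterMap (fun p =>
    (D p).bind (fun dp => if t ∈ nbrs maps rows cols p then some (dp + 1) else none))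

theorem contribs_cons (maps : List String) (rows cols : Int) (D : (Int × Int × Int) → Option Int)
    (p : Int × Int × Int) (ps : List (Int × Int × Int)) (t : Int × Int × Int) :
    contribs maps rows cols D (p :: ps) t
      = contribs maps rows cols D [p] t ++ contribs maps rows cols D ps t := by
  cases hD : D p <;> simp [contribs, List.filterMap_cons, hD] <;> split <;> simp

theorem mem_contribs (maps : List String) (rows cols : Int) (D : (Int × Int × Int) → Option Int)
    (ps : List (Int × Int × Int)) (t : Int × Int × Int) (v : Int) :
    v ∈ contribs maps rows cols D ps t
      ↔ ∃ p ∈ ps, ∃ dp, D p = some dp ∧ t ∈ nbrs maps rows cols p ∧ v = dp + 1 := by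
  simp only [contribs, List.mem_filterMap]
  constructor
  · rintro ⟨p, hp, he⟩
    cases hD : D p with
    | none => rw [hD] at he; exact absurd he (by simp)
    | some dp =>
      rw [hD] at he
      simp only [Option.bind_some] at he
      by_cases hn : t ∈ nbrs maps rows cols p
      · rw [if_pos hn] at he
        exact ⟨p, hp, dp, hD, hn, (Option.some_inj.mp he).symm⟩
      · rw [if_neg hn] at he
        exact absurd he (by simp)
  · rintro ⟨p, hp, dp, hD, hn, hv⟩
    refine ⟨p, hp, ?_⟩
    rw [hD]
    simp only [Option.bind_some]
    rw [if_pos hn, hv]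

theorem relaxFold_get? (maps : List String) (rows cols d b : Int) :
    ∀ (cells : List (Int × Int)) (st : PySem.Dict (Int × Int × Int) Int × Bool)
      (t : Int × Int × Int),
    (cnbrs maps rows cols cells b).Nodup →
    ((cells.foldl (relaxStep maps rows cols d b) st).1).get? t
      = if t ∈ cnbrs maps rows cols cells b then fmin (st.1.get? t) [d + 1]
        else st.1.get? t := by
  intro cells
  induction cells with
  | nil => intro st t _; simp [cnbrs]
  | cons p tl ih =>
    intro st t hnd
    rw [cnbrs_cons] at hnd ⊢
    rw [List.foldl_cons]
    by_cases hv : 0 ≤ p.1 ∧ p.1 < rows ∧ 0 ≤ p.2 ∧ p.2 < cols ∧ cellAt maps p.1 p.2 ≠ 'X'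
    · rw [if_pos hv] at hnd ⊢
      set u : Int × Int × Int := (p.1, p.2, if cellAt maps p.1 p.2 = 'L' then 1 else b) with hu
      rw [List.singleton_append] at hnd ⊢
      rw [List.nodup_cons] at hnd
      have hget : ∀ t', ((relaxStep maps rows cols d b st p).1).get? t'
          = if t' = u then fmin (st.1.get? u) [d + 1] else st.1.get? t' := by
        intro t'
        simp only [relaxStep, if_pos hv, ← hu]
        cases hD : st.1.get? u with
        | none =>
          show (st.1.insert u (d + 1)).get? t' = _
          rw [PySem.Dict.get?_insert]
          by_cases ht' : t' = u
          · rw [if_pos ht', if_pos ht']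
            rfl
          · rw [if_neg ht', if_neg ht']
        | some nd =>
          show (if d + 1 < nd then (st.1.insert u (d + 1), true) else st).1.get? t' = _
          by_cases hlt : d + 1 < nd
          · rw [if_pos hlt]
            show (st.1.insert u (d + 1)).get? t' = _
            rw [PySem.Dict.get?_insert]
            by_cases ht' : t' = u
            · rw [if_pos ht', if_pos ht']
              have hmin : min nd (d + 1) = d + 1 := by omega
              simp [fmin, hmin]
            · rw [if_neg ht', if_neg ht']
          · rw [if_neg hlt]
            by_cases ht' : t' = u
            · rw [if_pos ht', ht', hD]
              have hmin : min nd (d + 1) = nd := by omega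
              simp [fmin, hmin]
            · rw [if_neg ht']
      rw [ih (relaxStep maps rows cols d b st p) t hnd.2]
      by_cases htu : t = u
      · have htl : t ∉ cnbrs maps rows cols tl b := htu ▸ hnd.1
        rw [if_neg htl, if_pos (List.mem_cons.mpr (Or.inl htu)), hget t, if_pos htu, htu]
      · rw [hget t, if_neg htu]
        by_cases htl : t ∈ cnbrs maps rows cols tl b
        · rw [if_pos htl, if_pos (List.mem_cons.mpr (Or.inr htl))]
        · rw [if_neg htl, if_neg (by
            intro hm
            rcases List.mem_cons.mp hm with h' | h'
            exacts [htu h', htl h'])]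
    · rw [if_neg hv] at hnd ⊢
      rw [List.nil_append] at hnd ⊢
      have hstep : relaxStep maps rows cols d b st p = st := by
        simp only [relaxStep, if_neg hv]
      rw [hstep, ih st t hnd]


theorem srcStep_get? (maps : List String) (rows cols : Int)
    (dist : PySem.Dict (Int × Int × Int) Int) (st : PySem.Dict (Int × Int × Int) Int × Bool)
    (r c b : Int) (t : Int × Int × Int) :
    ((srcStep maps rows cols dist st r c b).1).get? t
      = fmin (st.1.get? t) (contribs maps rows cols dist.get? [(r, c, b)] t) := by
  cases hD : dist.get? (r, c, b) with
  | none =>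
    have hred : srcStep maps rows cols dist st r c b = st := by
      unfold srcStep
      rw [hD]
    rw [hred]
    have hco : contribs maps rows cols dist.get? [(r, c, b)] t = [] := by
      simp [contribs, hD]
    rw [hco, fmin_nil]
  | some d =>
    have hred : srcStep maps rows cols dist st r c b
        = [(r - 1, c), (r + 1, c), (r, c - 1), (r, c + 1)].foldl
            (relaxStep maps rows cols d b) st := by
      unfold srcStep
      rw [hD]
    rw [hred]
    have hcn : cnbrs maps rows cols [(r - 1, c), (r + 1, c), (r, c - 1), (r, c + 1)] b
        = nbrs maps rows cols (r, c, b) := by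
      rw [show nbrs maps rows cols (r, c, b)
          = cnbrs maps rows cols (pvDirs.map (fun dd => (r + dd.1, c + dd.2))) b from rfl,
        pv_dirs_cells r c]
    have hnodup : (cnbrs maps rows cols [(r - 1, c), (r + 1, c), (r, c - 1), (r, c + 1)] b).Nodup := by
      rw [hcn]
      exact nbrs_nodup maps rows cols (r, c, b)
    rw [relaxFold_get? maps rows cols d b _ st t hnodup, hcn]
    have hco : contribs maps rows cols dist.get? [(r, c, b)] t
        = if t ∈ nbrs maps rows cols (r, c, b) then [d + 1] else [] := by
      by_cases hn : t ∈ nbrs maps rows cols (r, c, b)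
      · simp [contribs, hD, hn]
      · simp [contribs, hD, hn]
    rw [hco]
    by_cases hn : t ∈ nbrs maps rows cols (r, c, b)
    · rw [if_pos hn, if_pos hn]
    · rw [if_neg hn, if_neg hn, fmin_nil]

theorem srcFold_get? (maps : List String) (rows cols : Int)
    (dist : PySem.Dict (Int × Int × Int) Int) :
    ∀ (ps : List (Int × Int × Int)) (st : PySem.Dict (Int × Int × Int) Int × Bool)
      (t : Int × Int × Int),
    ((ps.foldl (fun st p => srcStep maps rows cols dist st p.1 p.2.1 p.2.2) st).1).get? t
      = fmin (st.1.get? t) (contribs maps rows cols dist.get? ps t) := by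
  intro ps
  induction ps with
  | nil =>
    intro st t
    rw [List.foldl_nil, show contribs maps rows cols dist.get? [] t = [] from rfl, fmin_nil]
  | cons p tl ih =>
    obtain ⟨r, c, b⟩ := p
    intro st t
    rw [List.foldl_cons]
    show ((tl.foldl (fun st p => srcStep maps rows cols dist st p.1 p.2.1 p.2.2)
        (srcStep maps rows cols dist st r c b)).1).get? t = _
    rw [ih, srcStep_get?, ← fmin_append, ← contribs_cons]

def allStates (rows cols : Int) : List (Int × Int × Int) :=
  (PySem.List.pyRange 0 rows 1).flatMap (fun r =>
    (PySem.List.pyRange 0 cols 1).flatMap (fun c => [(r, c, 0), (r, c, 1)]))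

theorem roundB_eq (maps : List String) (rows cols : Int)
    (dist : PySem.Dict (Int × Int × Int) Int) :
    (allStates rows cols).foldl (fun st p => srcStep maps rows cols dist st p.1 p.2.1 p.2.2)
        (dist, false)
      = roundB maps rows cols dist := by
  unfold allStates roundB
  simp only [List.foldl_flatMap]
  rfl

theorem mem_allStates (rows cols : Int) (t : Int × Int × Int) :
    t ∈ allStates rows cols ↔ inBox rows cols t := by
  obtain ⟨r, c, b⟩ := t
  simp only [allStates, List.mem_flatMap, PySem.List.mem_pyRange_one, List.mem_cons,
    List.not_mem_nil, or_false, inBox, Prod.mk.injEq]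
  constructor
  · rintro ⟨r', hr', c', hc', h⟩
    rcases h with ⟨h1, h2, h3⟩ | ⟨h1, h2, h3⟩ <;> subst h1 <;> subst h2 <;>
      exact ⟨hr'.1, hr'.2, hc'.1, hc'.2, by simp [h3]⟩
  · rintro ⟨h1, h2, h3, h4, h5⟩
    refine ⟨r, ⟨h1, h2⟩, c, ⟨h3, h4⟩, ?_⟩
    rcases h5 with h | h <;> simp [h]

def chD (maps : List String) (rows cols : Int) (i : Nat) (t : Int × Int × Int) : Option Int :=
  if t ∈ RL maps rows cols i then some ((md maps rows cols t : Nat) : Int) else none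

theorem round_char (maps : List String) (rows cols : Int) (hr : 0 ≤ rows) (hc : 0 ≤ cols)
    (i : Nat) (dist : PySem.Dict (Int × Int × Int) Int)
    (hD : ∀ u, dist.get? u = chD maps rows cols i u) (t : Int × Int × Int) :
    ((roundB maps rows cols dist).1).get? t = chD maps rows cols (i + 1) t := by
  rw [← roundB_eq, srcFold_get?,
    show ((dist, false) : PySem.Dict (Int × Int × Int) Int × Bool).1 = dist from rfl, hD t]
  have hvge : ∀ v ∈ contribs maps rows cols dist.get? (allStates rows cols) t,
      t ∈ RL maps rows cols (i + 1) ∧ ((md maps rows cols t : Nat) : Int) ≤ v := by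
    intro v hv
    obtain ⟨p, hp, dp, hDp, hn, hveq⟩ := (mem_contribs maps rows cols _ _ t v).mp hv
    have hchp := hD p
    rw [hDp] at hchp
    by_cases hpi : p ∈ RL maps rows cols i
    · have hdp : dp = ((md maps rows cols p : Nat) : Int) := by
        rw [chD, if_pos hpi] at hchp
        exact Option.some_inj.mp hchp
      have ht1 : t ∈ RL maps rows cols (i + 1) :=
        (RL_succ_iff maps rows cols i t).mpr (Or.inr ⟨p, hpi, hn⟩)
      have hptop := RL_le_top maps rows cols hr hc i p hpi
      have hmdle := md_nbr_le maps rows cols hr hc hptop hn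
      refine ⟨ht1, ?_⟩
      rw [hveq, hdp]
      push_cast
      omega
    · rw [chD, if_neg hpi] at hchp
      exact absurd hchp (by simp)
  by_cases hti : t ∈ RL maps rows cols i
  · have h1 : t ∈ RL maps rows cols (i + 1) := RL_mono maps rows cols (Nat.le_succ i) hti
    rw [chD, if_pos hti, chD, if_pos h1]
    obtain ⟨w, hw⟩ : ∃ w, fmin (some ((md maps rows cols t : Nat) : Int))
        (contribs maps rows cols dist.get? (allStates rows cols) t) = some w := by
      cases hl : contribs maps rows cols dist.get? (allStates rows cols) t with
      | nil => exact ⟨_, rfl⟩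
      | cons v tl => exact fmin_cons_isSome v tl _
    rw [hw]
    have h2 : w ≤ ((md maps rows cols t : Nat) : Int) := (fmin_le _ _ _ hw).1 _ rfl
    have h3 : ((md maps rows cols t : Nat) : Int) ≤ w := by
      rcases fmin_mem _ _ _ hw with h' | h'
      · exact le_of_eq (Option.some_inj.mp h')
      · exact (hvge w h').2
    exact congrArg some (by omega)
  · by_cases hti1 : t ∈ RL maps rows cols (i + 1)
    · have hmd : md maps rows cols t = i + 1 := md_frontier maps rows cols hr hc hti1 hti
      rw [chD, if_neg hti, chD, if_pos hti1]
      obtain ⟨p, hpRL, hn⟩ : ∃ p ∈ RL maps rows cols i, t ∈ nbrs maps rows cols p := by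
        rcases (RL_succ_iff maps rows cols i t).mp hti1 with h | h
        exacts [absurd h hti, h]
      have hpA : p ∈ allStates rows cols :=
        (mem_allStates rows cols p).mpr (RL_inBox maps rows cols i p hpRL)
      have hDp : dist.get? p = some ((md maps rows cols p : Nat) : Int) := by
        rw [hD p, chD, if_pos hpRL]
      have hvmem : (((md maps rows cols p : Nat) : Int) + 1)
          ∈ contribs maps rows cols dist.get? (allStates rows cols) t :=
        (mem_contribs maps rows cols _ _ t _).mpr ⟨p, hpA, _, hDp, hn, rfl⟩
      obtain ⟨w, hw⟩ : ∃ w, fmin none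
          (contribs maps rows cols dist.get? (allStates rows cols) t) = some w := by
        cases hl : contribs maps rows cols dist.get? (allStates rows cols) t with
        | nil => rw [hl] at hvmem; exact absurd hvmem (by simp)
        | cons v tl => exact fmin_cons_isSome v tl none
      rw [hw]
      have hle := (fmin_le _ _ _ hw).2 _ hvmem
      rcases fmin_mem _ _ _ hw with h' | h'
      · exact absurd h' (by simp)
      · have hge := (hvge w h').2
        have hmdp : md maps rows cols p ≤ i := md_le maps rows cols hr hc hpRL
        refine congrArg some ?_
        rw [hmd] at hge ⊢
        push_cast at hge hle ⊢
        omega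
    · rw [chD, if_neg hti, chD, if_neg hti1]
      have hemp : contribs maps rows cols dist.get? (allStates rows cols) t = [] := by
        rw [List.eq_nil_iff_forall_not_mem]
        intro v hv
        obtain ⟨p, hp, dp, hDp, hn, _⟩ := (mem_contribs maps rows cols _ _ t v).mp hv
        have hchp := hD p
        rw [hDp] at hchp
        by_cases hpi : p ∈ RL maps rows cols i
        · exact hti1 ((RL_succ_iff maps rows cols i t).mpr (Or.inr ⟨p, hpi, hn⟩))
        · rw [chD, if_neg hpi] at hchp
          exact absurd hchp (by simp)
      rw [hemp, fmin_nil]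

-- ---------- the `changed` flag is sound: no change means the dict is unchanged ----------
theorem foldl_flag {α β : Type} (f : β × Bool → α → β × Bool)
    (hf : ∀ st x, (f st x).2 = false → f st x = st) :
    ∀ (l : List α) (st : β × Bool), (l.foldl f st).2 = false → l.foldl f st = st := by
  intro l
  induction l with
  | nil => intro st _; rfl
  | cons x tl ih =>
    intro st h
    rw [List.foldl_cons] at h ⊢
    have h1 := ih (f st x) h
    rw [h1] at h ⊢
    exact hf st x h

theorem relaxStep_flag (maps : List String) (rows cols d b : Int) :
    ∀ (st : PySem.Dict (Int × Int × Int) Int × Bool) (p : Int × Int),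
      (relaxStep maps rows cols d b st p).2 = false → relaxStep maps rows cols d b st p = st := by
  intro st p
  by_cases hv : 0 ≤ p.1 ∧ p.1 < rows ∧ 0 ≤ p.2 ∧ p.2 < cols ∧ cellAt maps p.1 p.2 ≠ 'X'
  · set u : Int × Int × Int := (p.1, p.2, if cellAt maps p.1 p.2 = 'L' then 1 else b) with hu
    have hred : relaxStep maps rows cols d b st p
        = match st.1.get? u with
          | none => (st.1.insert u (d + 1), true)
          | some nd => if d + 1 < nd then (st.1.insert u (d + 1), true) else st := by
      simp only [relaxStep, if_pos hv, ← hu]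
    rw [hred]
    cases hD : st.1.get? u with
    | none =>
      show ((st.1.insert u (d + 1), true) : PySem.Dict (Int × Int × Int) Int × Bool).2 = false
          → ((st.1.insert u (d + 1), true) : PySem.Dict (Int × Int × Int) Int × Bool) = st
      intro h
      exact absurd h (by simp)
    | some nd =>
      show (if d + 1 < nd then ((st.1.insert u (d + 1), true) : PySem.Dict (Int × Int × Int) Int × Bool)
            else st).2 = false
          → (if d + 1 < nd then ((st.1.insert u (d + 1), true) : PySem.Dict (Int × Int × Int) Int × Bool)
            else st) = st
      by_cases hlt : d + 1 < nd
      · rw [if_pos hlt]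
        intro h
        exact absurd h (by simp)
      · rw [if_neg hlt]
        intro _
        rfl
  · exact fun _ => by simp only [relaxStep, if_neg hv]

theorem srcStep_flag (maps : List String) (rows cols : Int)
    (dist : PySem.Dict (Int × Int × Int) Int) :
    ∀ (st : PySem.Dict (Int × Int × Int) Int × Bool) (r c b : Int),
      (srcStep maps rows cols dist st r c b).2 = false →
      srcStep maps rows cols dist st r c b = st := by
  intro st r c b
  unfold srcStep
  split
  · intro _
    rfl
  · intro h
    exact foldl_flag _ (relaxStep_flag maps rows cols _ b) _ st h

theorem roundB_flag (maps : List String) (rows cols : Int)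
    (dist : PySem.Dict (Int × Int × Int) Int) :
    (roundB maps rows cols dist).2 = false → (roundB maps rows cols dist).1 = dist := by
  intro h
  have hres : roundB maps rows cols dist = (dist, false) := by
    unfold roundB at h ⊢
    exact foldl_flag _
      (fun st r h0 => foldl_flag _
        (fun st c h1 => foldl_flag _
          (fun st b h2 => srcStep_flag maps rows cols dist st r c b h2) _ st h1) _ st h0)
      _ (dist, false) h
  rw [hres]

theorem chD_stable_ge (maps : List String) (rows cols : Int) (hr : 0 ≤ rows) (hc : 0 ≤ cols)
    {i : Nat} (hge : pvN rows cols ≤ i) (t : Int × Int × Int) :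
    chD maps rows cols i t = chD maps rows cols (pvN rows cols) t := by
  unfold chD
  by_cases hm : t ∈ RL maps rows cols (pvN rows cols)
  · rw [if_pos (RL_mono maps rows cols hge hm), if_pos hm]
  · rw [if_neg (fun hx => hm (RL_le_top maps rows cols hr hc i t hx)), if_neg hm]

theorem bellLoop_char (maps : List String) (rows cols : Int) (hr : 0 ≤ rows) (hc : 0 ≤ cols) :
    ∀ (k i : Nat) (dist : PySem.Dict (Int × Int × Int) Int),
      (∀ u, dist.get? u = chD maps rows cols i u) → pvN rows cols ≤ i + k →
      ∀ t, (bellLoop maps rows cols k dist).get? t = chD maps rows cols (pvN rows cols) t := by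
  intro k
  induction k with
  | zero =>
    intro i dist hD hle t
    show dist.get? t = _
    rw [hD t]
    exact chD_stable_ge maps rows cols hr hc (by omega) t
  | succ k ih =>
    intro i dist hD hle t
    have hro : ∀ u, ((roundB maps rows cols dist).1).get? u = chD maps rows cols (i + 1) u :=
      round_char maps rows cols hr hc i dist hD
    show (if (roundB maps rows cols dist).2 then bellLoop maps rows cols k (roundB maps rows cols dist).1
        else (roundB maps rows cols dist).1).get? t = _
    by_cases hflag : (roundB maps rows cols dist).2 = true
    · rw [if_pos hflag]
      exact ih (i + 1) _ hro (by omega) t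
    · rw [if_neg hflag]
      have hfe : (roundB maps rows cols dist).2 = false := by
        cases hb : (roundB maps rows cols dist).2
        · rfl
        · exact absurd hb hflag
      have h1 : (roundB maps rows cols dist).1 = dist := roundB_flag maps rows cols dist hfe
      have hsub : ∀ u, u ∈ RL maps rows cols (i + 1) → u ∈ RL maps rows cols i := by
        intro u hu
        have hthis := hro u
        rw [h1, hD u] at hthis
        unfold chD at hthis
        rw [if_pos hu] at hthis
        by_cases hui : u ∈ RL maps rows cols i
        · exact hui
        · rw [if_neg hui] at hthis
          exact absurd hthis (by simp)
      have hstab := RL_stable_of maps rows cols i hsub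
      rw [hro t]
      unfold chD
      by_cases hm : t ∈ RL maps rows cols (pvN rows cols)
      · rw [if_pos hm, if_pos (RL_mono maps rows cols (Nat.le_succ i) (hstab _ t hm))]
      · rw [if_neg hm, if_neg (fun hx => hm (RL_le_top maps rows cols hr hc (i + 1) t hx))]


-- ---------- the initial scan of B, and nodup facts for the start states ----------
theorem pyRange_one_nodup : ∀ (n : Nat) (a b : Int), (b - a).toNat ≤ n →
    (PySem.List.pyRange a b 1).Nodup := by
  intro n
  induction n with
  | zero =>
    intro a b h
    have he : PySem.List.pyRange a b 1 = [] := by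
      rw [List.eq_nil_iff_forall_not_mem]
      intro x hx
      have := (PySem.List.mem_pyRange_one).mp hx
      omega
    rw [he]
    exact List.nodup_nil
  | succ n ih =>
    intro a b h
    by_cases hab : a < b
    · rw [PySem.List.pyRange_one_cons hab]
      refine List.nodup_cons.mpr ⟨?_, ih (a + 1) b (by omega)⟩
      intro hx
      have := (PySem.List.mem_pyRange_one).mp hx
      omega
    · have he : PySem.List.pyRange a b 1 = [] := by
        rw [List.eq_nil_iff_forall_not_mem]
        intro x hx
        have := (PySem.List.mem_pyRange_one).mp hx
        omega
      rw [he]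
      exact List.nodup_nil

theorem pyRange_nodup (a b : Int) : (PySem.List.pyRange a b 1).Nodup :=
  pyRange_one_nodup (b - a).toNat a b le_rfl

theorem pv_flatMap_nodup {α β : Type} (g : β → α) :
    ∀ (l : List α) (f : α → List β),
    (∀ a ∈ l, ∀ x ∈ f a, g x = a) → l.Nodup → (∀ a ∈ l, (f a).Nodup) →
    (l.flatMap f).Nodup := by
  intro l
  induction l with
  | nil => intro f _ _ _; simp
  | cons a tl ih =>
    intro f hg hl hf
    rw [List.flatMap_cons]
    rw [List.nodup_cons] at hl
    refine List.Nodup.append (hf a (by simp))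
      (ih f (fun a' ha' x hx => hg a' (by simp [ha']) x hx) hl.2
        (fun a' ha' => hf a' (by simp [ha']))) ?_
    intro x hx hx2
    obtain ⟨a', ha', hxa'⟩ := List.mem_flatMap.mp hx2
    have h1 := hg a (by simp) x hx
    have h2 := hg a' (by simp [ha']) x hxa'
    exact hl.1 (by rwa [show a = a' from h1 ▸ h2])

theorem startsB_nodup (maps : List String) (rows cols : Int) :
    (startsB maps rows cols).Nodup := by
  unfold startsB
  refine pv_flatMap_nodup (fun t : Int × Int × Int => t.1) _ _ ?_ (pyRange_nodup 0 rows) ?_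
  · intro r hr x hx
    obtain ⟨c, hc, he⟩ := List.mem_map.mp hx
    rw [← he]
  · intro r hr
    refine List.Nodup.map ?_ (List.Nodup.filter _ (pyRange_nodup 0 cols))
    intro c1 c2 he
    exact congrArg (fun t : Int × Int × Int => t.2.1) he

theorem pv_rowB_corr (maps : List String) (r : Int) :
    ∀ (J : List Int) (dd : PySem.Dict (Int × Int × Int) Int) (e : Option (Int × Int)),
    J.foldl (fun st c => cellStepB maps st r c) (dd, e)
      = (((J.filter (fun c => cellAt maps r c = 'S')).map
            (fun c => ((r, c, (0 : Int)) : Int × Int × Int))).foldl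
            (fun d s => d.insert s 0) dd,
         ((J.filter (fun c => cellAt maps r c = 'E')).map
            (fun c => some ((r, c) : Int × Int))).getLast?.getD e) := by
  intro J
  induction J with
  | nil => intro dd e; simp
  | cons c J' ihJ =>
    intro dd e
    simp only [List.foldl_cons]
    by_cases hS : cellAt maps r c = 'S'
    · have hE : ¬ cellAt maps r c = 'E' := by rw [hS]; decide
      have hcs : cellStepB maps (dd, e) r c = (dd.insert (r, c, 0) 0, e) := by
        simp [cellStepB, hS, hE]
      rw [hcs, ihJ]
      simp [hS, hE]
    · by_cases hE : cellAt maps r c = 'E'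
      · have hcs : cellStepB maps (dd, e) r c = (dd, some (r, c)) := by
          simp [cellStepB, hS, hE]
        rw [hcs, ihJ]
        simp only [List.filter_cons, hS, hE, decide_true, decide_false, if_true, if_false,
          List.map_cons, Prod.mk.injEq]
        exact ⟨rfl, (pv_getLast_cons_getD _ _ _).symm⟩
      · have hcs : cellStepB maps (dd, e) r c = (dd, e) := by
          simp [cellStepB, hS, hE]
        rw [hcs, ihJ]
        simp [hS, hE]

theorem pv_scanB_gen (maps : List String) (cols : Int) :
    ∀ (I : List Int) (dd : PySem.Dict (Int × Int × Int) Int) (e : Option (Int × Int)),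
    I.foldl (fun st r =>
        (PySem.List.pyRange 0 cols 1).foldl (fun st c => cellStepB maps st r c) st) (dd, e)
      = ((I.flatMap (fun r => ((PySem.List.pyRange 0 cols 1).filter
            (fun c => cellAt maps r c = 'S')).map
            (fun c => ((r, c, (0 : Int)) : Int × Int × Int)))).foldl
            (fun d s => d.insert s 0) dd,
         (I.flatMap (fun r => ((PySem.List.pyRange 0 cols 1).filter
            (fun c => cellAt maps r c = 'E')).map
            (fun c => some ((r, c) : Int × Int)))).getLast?.getD e) := by
  intro I
  induction I with
  | nil => intro dd e; simp
  | cons r I' ihI =>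
    intro dd e
    simp only [List.foldl_cons]
    rw [pv_rowB_corr maps r (PySem.List.pyRange 0 cols 1) dd e, ihI]
    simp only [List.flatMap_cons, List.foldl_append, Prod.mk.injEq]
    refine ⟨trivial, ?_⟩
    rw [List.getLast?_append]
    cases hl : (I'.flatMap (fun r => ((PySem.List.pyRange 0 cols 1).filter
        (fun c => cellAt maps r c = 'E')).map
        (fun c => some ((r, c) : Int × Int)))).getLast? with
    | none => simp
    | some a => simp

theorem scanB_corr (maps : List String) (rows cols : Int) :
    scanB maps rows cols
      = ((startsB maps rows cols).foldl (fun d s => d.insert s 0) PySem.Dict.empty,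
         ((exitsB maps rows cols).map some).getLast?.getD none) := by
  unfold scanB startsB exitsB
  rw [pv_scanB_gen maps cols (PySem.List.pyRange 0 rows 1) PySem.Dict.empty none]
  rw [Prod.mk.injEq]
  refine ⟨rfl, ?_⟩
  rw [List.map_flatMap]
  simp only [List.map_map]
  rfl

theorem foldl_insert0_get? :
    ∀ (l : List (Int × Int × Int)) (d : PySem.Dict (Int × Int × Int) Int) (t : Int × Int × Int),
    (l.foldl (fun d s => d.insert s (0 : Int)) d).get? t
      = if t ∈ l then some 0 else d.get? t := by
  intro l
  induction l with
  | nil => intro d t; simp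
  | cons s tl ih =>
    intro d t
    rw [List.foldl_cons, ih]
    by_cases htl : t ∈ tl
    · rw [if_pos htl, if_pos (by simp [htl])]
    · rw [if_neg htl, PySem.Dict.get?_insert]
      by_cases hts : t = s
      · rw [if_pos hts, if_pos (by simp [hts])]
      · rw [if_neg hts, if_neg (by simp [hts, htl])]

-- ---------- assembling both sides ----------
theorem pv_ans (maps : List String) (rows cols : Int) (hr : 0 ≤ rows) (hc : 0 ≤ cols)
    (g : Int × Int × Int) :
    loopB maps rows cols g (2 * (rows * cols).toNat + 1) (startsB maps rows cols) [] 0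
        (PySem.Set.ofList (startsB maps rows cols))
      = (if g ∈ RL maps rows cols (pvN rows cols)
         then ((md maps rows cols g : Nat) : Int) else -1) := by
  have hS0 : (startsB maps rows cols).Nodup := startsB_nodup maps rows cols
  have happ := levelLoop_correct maps rows cols hr hc g (2 * (rows * cols).toNat + 1) 0
      (startsB maps rows cols) [] (PySem.Set.ofList (startsB maps rows cols))
      (fun s hs => ⟨hs, Nat.le_zero.mp (md_le maps rows cols hr hc hs)⟩)
      (fun t ht => absurd ht (by simp))
      List.nodup_nil
      (PySem.Set.nodup_ofList _)
      (fun t => by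
        rw [PySem.Set.mem_ofList]
        constructor
        · exact fun h => Or.inl h
        · rintro (h | h)
          · exact h
          · exact absurd h (by simp))
      (fun t h1 h0 => by
        rcases (RL_succ_iff maps rows cols 0 t).mp h1 with h | h
        exacts [absurd h h0, Or.inr h])
      (fun h => h)
      (fun k hk => absurd hk (Nat.not_lt_zero k))
      (fun _ => rfl)
      (by
        have hofF : (PySem.Set.ofList (startsB maps rows cols)).toFinset
            = (startsB maps rows cols).toFinset := by
          ext x
          simp [PySem.Set.mem_ofList]
        rw [hofF]
        have hsub : (startsB maps rows cols).toFinset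
            ⊆ (RL maps rows cols (pvN rows cols)).toFinset := by
          intro x hx
          rw [List.mem_toFinset] at hx ⊢
          exact RL_le_top maps rows cols hr hc 0 x hx
        have h1 : ((RL maps rows cols (pvN rows cols)).toFinset
            \ (startsB maps rows cols).toFinset).card
            = (RL maps rows cols (pvN rows cols)).toFinset.card
              - (startsB maps rows cols).toFinset.card := by
          rw [Finset.card_sdiff, Finset.inter_eq_left.mpr hsub]
        have h2 : (startsB maps rows cols).toFinset.card = (startsB maps rows cols).length :=
          List.toFinset_card_of_nodup hS0
        have h3 : (startsB maps rows cols).toFinset.card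
            ≤ (RL maps rows cols (pvN rows cols)).toFinset.card :=
          Finset.card_le_card hsub
        have h4 := RL_card_le maps rows cols hr hc (pvN rows cols)
        have hmul : 0 ≤ rows * cols := mul_nonneg hr hc
        have h5 : pvN rows cols = 2 * (rows * cols).toNat := by
          unfold pvN
          omega
        simp only [List.length_nil]
        omega)
  simpa using happ

theorem pv_final (maps : List String) : solution maps = solution_alt maps := by
  have hr : (0 : Int) ≤ (maps.length : Int) := Int.natCast_nonneg _
  have hc : (0 : Int) ≤ ((maps.headD "").toList.length : Int) := Int.natCast_nonneg _
  simp only [solution, solution_alt, pv_scan_corr, scanB_corr]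
  have hD0 : ∀ u, ((startsB maps (maps.length : Int)
      ((maps.headD "").toList.length : Int)).foldl
        (fun d s => d.insert s 0) PySem.Dict.empty).get? u
      = chD maps (maps.length : Int) ((maps.headD "").toList.length : Int) 0 u := by
    intro u
    rw [foldl_insert0_get?]
    unfold chD
    by_cases hm : u ∈ startsB maps (maps.length : Int) ((maps.headD "").toList.length : Int)
    · rw [if_pos hm,
        if_pos (show u ∈ RL maps (maps.length : Int) ((maps.headD "").toList.length : Int) 0
          from hm)]
      have hz : md maps (maps.length : Int) ((maps.headD "").toList.length : Int) u = 0 :=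
        Nat.le_zero.mp (md_le maps _ _ hr hc
          (show u ∈ RL maps (maps.length : Int) ((maps.headD "").toList.length : Int) 0 from hm))
      rw [hz]
      simp
    · rw [if_neg hm, if_neg (show u ∉ RL maps (maps.length : Int)
        ((maps.headD "").toList.length : Int) 0 from hm), PySem.Dict.get?_empty]
  cases hE : (exitsB maps (maps.length : Int) ((maps.headD "").toList.length : Int)).getLast? with
  | none =>
    simp only [hE, List.getLast?_map, Option.map_none, Option.getD_none]
    have hAB : loopA maps (maps.length : Int) ((maps.headD "").toList.length : Int) (-1) (-1)
        (2 * ((maps.length : Int) * ((maps.headD "").toList.length : Int)).toNat + 1)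
        ((startsB maps (maps.length : Int) ((maps.headD "").toList.length : Int)).map (pvAtt 0))
        (PySem.Set.ofList (startsB maps (maps.length : Int) ((maps.headD "").toList.length : Int)))
        = loopB maps (maps.length : Int) ((maps.headD "").toList.length : Int) (-1, -1, 1)
          (2 * ((maps.length : Int) * ((maps.headD "").toList.length : Int)).toNat + 1)
          (startsB maps (maps.length : Int) ((maps.headD "").toList.length : Int)) [] 0
          (PySem.Set.ofList (startsB maps (maps.length : Int)
            ((maps.headD "").toList.length : Int))) := by
      simpa using pv_loop_corr maps (maps.length : Int) ((maps.headD "").toList.length : Int)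
        (-1) (-1)
        (2 * ((maps.length : Int) * ((maps.headD "").toList.length : Int)).toNat + 1) 0
        (startsB maps (maps.length : Int) ((maps.headD "").toList.length : Int)) []
        (PySem.Set.ofList (startsB maps (maps.length : Int)
          ((maps.headD "").toList.length : Int)))
        (fun _ => rfl)
    rw [hAB, pv_ans maps _ _ hr hc]
    rw [if_neg]
    intro hmem
    have hbox := RL_inBox maps _ _ _ _ hmem
    have h1 := hbox.1
    norm_num at h1
  | some e =>
    simp only [hE, List.getLast?_map, Option.map_some, Option.getD_some]
    have hAB : loopA maps (maps.length : Int) ((maps.headD "").toList.length : Int) e.1 e.2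
        (2 * ((maps.length : Int) * ((maps.headD "").toList.length : Int)).toNat + 1)
        ((startsB maps (maps.length : Int) ((maps.headD "").toList.length : Int)).map (pvAtt 0))
        (PySem.Set.ofList (startsB maps (maps.length : Int) ((maps.headD "").toList.length : Int)))
        = loopB maps (maps.length : Int) ((maps.headD "").toList.length : Int) (e.1, e.2, 1)
          (2 * ((maps.length : Int) * ((maps.headD "").toList.length : Int)).toNat + 1)
          (startsB maps (maps.length : Int) ((maps.headD "").toList.length : Int)) [] 0
          (PySem.Set.ofList (startsB maps (maps.length : Int)
            ((maps.headD "").toList.length : Int))) := by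
      simpa using pv_loop_corr maps (maps.length : Int) ((maps.headD "").toList.length : Int)
        e.1 e.2
        (2 * ((maps.length : Int) * ((maps.headD "").toList.length : Int)).toNat + 1) 0
        (startsB maps (maps.length : Int) ((maps.headD "").toList.length : Int)) []
        (PySem.Set.ofList (startsB maps (maps.length : Int)
          ((maps.headD "").toList.length : Int)))
        (fun _ => rfl)
    rw [hAB, pv_ans maps _ _ hr hc]
    have hBL := bellLoop_char maps (maps.length : Int) ((maps.headD "").toList.length : Int)
      hr hc (pvN (maps.length : Int) ((maps.headD "").toList.length : Int)) 0 _ hD0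
      (by omega) (e.1, e.2, 1)
    rw [show (2 * ((maps.length : Int) * ((maps.headD "").toList.length : Int))).toNat
        = pvN (maps.length : Int) ((maps.headD "").toList.length : Int) from rfl]
    rw [hBL]
    unfold chD
    by_cases hm : (e.1, e.2, 1) ∈ RL maps (maps.length : Int)
        ((maps.headD "").toList.length : Int)
        (pvN (maps.length : Int) ((maps.headD "").toList.length : Int))
    · rw [if_pos hm, if_pos hm]
    · rw [if_neg hm, if_neg hm]

-- ===== VERDICT (by name: the statement is the Claim_ definition above) =====
theorem solution_spec : Claim_equal_solution := by
  intro maps _ _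
  show solution maps = solution_alt maps
  exact pv_final maps
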